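-- pv_equiv track=rewrite | github.com/Shivam798/interview-subarray-questions | Striver 180/String/16_3minno,reqpalind.py | solve
-- ===== SOURCE A (Python) =====
-- def solve(s):
--     start=0
--     end=len(s)-1
--     res=0
--     while start<end:
--         if s[start]==s[end]:
--             start+=1
--             end-=1
--         else:
--             res+=1
--             start=0
--             end=len(s)-res-1
--     return res
-- ===== SOURCE B (Python) =====
-- def solve(s):
--     # Scan down from the full length for the longest palindromic prefix,
--     # testing each candidate prefix by comparing it with its reverse;
--     # the answer is the number of trailing characters outside that prefix.
--     k = len(s)
--     while True:
--         p = s[:k]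
--         if p == p[::-1]:
--             return len(s) - k
--         k -= 1
-- ===== Notes on version B (the rewrite author's own statement) =====
-- stated objective: alternative
-- what changed: B replaces A's restarting two-pointer palindrome check with a downward scan that compares each candidate prefix s[:k] with its reverse and returns len(s)-k for the longest palindromic prefix.
import Mathlib
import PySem

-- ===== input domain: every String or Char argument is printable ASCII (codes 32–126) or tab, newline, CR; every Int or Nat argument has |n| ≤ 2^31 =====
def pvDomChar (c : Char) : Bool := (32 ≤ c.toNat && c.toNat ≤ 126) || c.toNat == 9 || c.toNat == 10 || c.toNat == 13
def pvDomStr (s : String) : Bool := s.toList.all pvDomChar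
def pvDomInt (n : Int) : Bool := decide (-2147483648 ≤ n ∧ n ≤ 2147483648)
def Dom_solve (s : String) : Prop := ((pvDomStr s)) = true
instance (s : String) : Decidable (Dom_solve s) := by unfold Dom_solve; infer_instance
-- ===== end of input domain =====

-- B re-implements A as a downward scan for the longest palindromic prefix (whole-prefix
-- reverse comparison) instead of A's character-by-character two-pointer check that
-- restarts from scratch on each mismatch; objective: alternative decomposition, not speed.

-- ===== PORT A =====
-- A's while loop: state (start, e, res); on mismatch res += 1 and restart at (0, len-res-1)
def solveLoopA (l : List Char) (start e res : Int) : Int :=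
  if _h : start < e then
    match PySem.List.pyGet? l start, PySem.List.pyGet? l e with
    | some a, some b =>
      if a = b then solveLoopA l (start + 1) (e - 1) res
      else solveLoopA l 0 ((l.length : Int) - (res + 1) - 1) (res + 1)
    | _, _ => 0  -- unreachable from the entry call (Python would raise IndexError)
  else res
termination_by (((l.length : Int) - res).toNat, (e - start).toNat)
decreasing_by all_goals simp [Prod.lex_iff]; omega

def solve (s : String) : Int := solveLoopA s.toList 0 ((s.toList.length : Int) - 1) 0

-- ===== PORT B =====
-- B's while loop: test the k-prefix against its reverse, else k -= 1
def solveLoopB (l : List Char) (k : Int) : Int :=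
  if _h : l.take k.toNat = (l.take k.toNat).reverse then (l.length : Int) - k
  else solveLoopB l (k - 1)
termination_by k.toNat
decreasing_by
  have hk : k.toNat ≠ 0 := by intro h0; exact _h (by simp [h0])
  omega

def solve_alt (s : String) : Int := solveLoopB s.toList (s.toList.length : Int)

-- ===== PRECONDITION & SPEC =====
def Spec_solve (s : String) (out : Int) : Prop := out = solve_alt s
instance (s : String) (out : Int) : Decidable (Spec_solve s out) := by unfold Spec_solve; infer_instance

-- ===== CLAIM (what is proved, stated in full; the proofs are below) =====
def Claim_equal_solve : Prop := ∀ (s : String), Dom_solve s → Spec_solve s (solve s)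

-- ===== LEMMAS AND PROOFS =====

lemma pal_iff (l : List Char) (mm : Nat) (hm : mm ≤ l.length) :
    (l.take mm = (l.take mm).reverse) ↔ ∀ i, i < mm → l[i]? = l[mm - 1 - i]? := by
  have hlen : (l.take mm).length = mm := by simp [hm]
  constructor
  · intro h i hi
    have h1 : l[i]? = (l.take mm)[i]? := by simp [hi]
    have h2 : (l.take mm).reverse[i]? = (l.take mm)[mm - 1 - i]? := by
      rw [List.getElem?_reverse (by omega), hlen]
    have h3 : (l.take mm)[mm - 1 - i]? = l[mm - 1 - i]? := by
      simp [List.getElem?_take]; omega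
    rw [h1, h, h2, h3]
  · intro h
    apply List.ext_getElem?
    intro i
    by_cases hi : i < mm
    · rw [List.getElem?_reverse (by omega), hlen]
      have e1 : (l.take mm)[i]? = l[i]? := by simp [hi]
      have e2 : (l.take mm)[mm - 1 - i]? = l[mm - 1 - i]? := by
        simp [List.getElem?_take]; omega
      rw [e1, e2]; exact h i hi
    · rw [List.getElem?_eq_none (by omega), List.getElem?_eq_none (by simp; omega)]

lemma loopA_eq (l : List Char) : ∀ (μ : Nat) (start res : Int),
    (((l.length : Int) - res) * ((l.length : Int) + 2)
       + ((l.length : Int) - res - 1 - 2 * start)).toNat = μ →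
    0 ≤ start → 0 ≤ res →
    (∀ j : Int, 0 ≤ j → j < start →
      PySem.List.pyGet? l j = PySem.List.pyGet? l ((l.length : Int) - res - 1 - j)) →
    solveLoopA l start ((l.length : Int) - res - 1 - start) res
      = solveLoopB l ((l.length : Int) - res) := by
  intro μ
  induction μ using Nat.strong_induction_on with
  | _ μ IH =>
  intro start res hμ h0 hres H
  set n : Int := (l.length : Int) with hn
  rw [solveLoopA.eq_def]
  by_cases hlt : start < n - res - 1 - start
  · -- loop body runs
    rw [dif_pos hlt]
    have hsr : start.toNat < l.length := by omega
    have her : (n - res - 1 - start).toNat < l.length := by omega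
    have ha : PySem.List.pyGet? l start = some l[start.toNat] :=
      PySem.List.pyGet?_eq_some_getElem l (by omega) (by omega)
    have hb : PySem.List.pyGet? l (n - res - 1 - start)
        = some l[(n - res - 1 - start).toNat] :=
      PySem.List.pyGet?_eq_some_getElem l (by omega) (by omega)
    rw [ha, hb]
    dsimp only
    by_cases hab : l[start.toNat] = l[(n - res - 1 - start).toNat]
    · simp only [hab, if_true]
      have hP0 : 0 < (n - res) * (n + 2) := mul_pos (by omega) (by omega)
      have h := IH (((n - res) * (n + 2) + (n - res - 1 - 2 * (start + 1))).toNat)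
        (by omega) (start + 1) res rfl (by omega) hres (by
          intro j hj hj'
          rcases lt_or_ge j start with hc | hc
          · exact H j hj hc
          · have hjs : j = start := by omega
            subst hjs
            rw [ha, hb, hab])
      have e : n - res - 1 - (start + 1) = n - res - 1 - start - 1 := by ring
      rw [e] at h
      exact h
    · rw [if_neg hab]
      have hm : (n - res).toNat ≤ l.length := by omega
      have hnp : ¬ (l.take (n - res).toNat = (l.take (n - res).toNat).reverse) := by
        intro hpal
        have hp := (pal_iff l ((n - res).toNat) hm).mp hpal start.toNat (by omega)
        have hidx : (n - res).toNat - 1 - start.toNat = (n - res - 1 - start).toNat := by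
          omega
        rw [hidx, List.getElem?_eq_getElem hsr, List.getElem?_eq_getElem her] at hp
        exact hab (Option.some.inj hp)
      conv_rhs => rw [solveLoopB.eq_def]
      rw [dif_neg hnp]
      have hX : 0 < (n - res - 1) * (n + 2) := mul_pos (by omega) (by omega)
      have hexp : (n - res) * (n + 2) = (n - res - 1) * (n + 2) + (n + 2) := by ring
      have hd : (n - (res + 1)) * (n + 2) = (n - res - 1) * (n + 2) := by ring
      have h := IH (((n - (res + 1)) * (n + 2) + (n - (res + 1) - 1 - 2 * 0)).toNat)
        (by omega) 0 (res + 1) rfl le_rfl (by omega) (by intro j hj hj'; omega)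
      rw [show ((l.length : Int) - (res + 1) - 1) = n - (res + 1) - 1 - 0 from by rw [hn]; ring,
        show n - res - 1 = n - (res + 1) from by ring]
      exact h
  · -- loop exits: res is the answer, and take (n-res) is a palindrome
    rw [dif_neg hlt]
    have hm : (n - res).toNat ≤ l.length := by omega
    have hpal : l.take (n - res).toNat = (l.take (n - res).toNat).reverse := by
      apply (pal_iff l _ hm).mpr
      intro i hi
      rcases lt_or_ge (i : Int) start with hc | hc
      · have h := H i (by omega) hc
        rw [PySem.List.pyGet?_natCast] at h
        have hb' : PySem.List.pyGet? l (n - res - 1 - (i : Int))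
            = some l[(n - res - 1 - (i : Int)).toNat] :=
          PySem.List.pyGet?_eq_some_getElem l (by omega) (by omega)
        rw [hb'] at h
        have hidx : (n - res).toNat - 1 - i = (n - res - 1 - (i : Int)).toNat := by omega
        rw [hidx, List.getElem?_eq_getElem (show (n - res - 1 - (i : Int)).toNat < l.length by omega)]
        exact h
      · rcases lt_or_ge (((n - res).toNat - 1 - i : Nat) : Int) start with hj | hj
        · have h := H ((n - res).toNat - 1 - i : Nat) (by omega) hj
          rw [PySem.List.pyGet?_natCast] at h
          have hb' : PySem.List.pyGet? l (n - res - 1 - (((n - res).toNat - 1 - i : Nat) : Int))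
              = some l[(n - res - 1 - (((n - res).toNat - 1 - i : Nat) : Int)).toNat] :=
            PySem.List.pyGet?_eq_some_getElem l (by omega) (by omega)
          rw [hb'] at h
          have hidx : (n - res - 1 - (((n - res).toNat - 1 - i : Nat) : Int)).toNat = i := by
            omega
          simp only [hidx] at h
          rw [h, List.getElem?_eq_getElem (show i < l.length by omega)]
        · have hii : (n - res).toNat - 1 - i = i := by omega
          rw [hii]
    rw [solveLoopB.eq_def, dif_pos hpal]
    omega

-- ===== VERDICT (by name: the statement is the Claim_ definition above) =====
theorem solve_spec : Claim_equal_solve := by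
  intro s _
  unfold Spec_solve solve solve_alt
  have h := loopA_eq s.toList
    (((s.toList.length : Int) - 0) * ((s.toList.length : Int) + 2)
      + ((s.toList.length : Int) - 0 - 1 - 2 * 0)).toNat 0 0 rfl le_rfl le_rfl
    (by intro j hj hj'; omega)
  rw [show ((s.toList.length : Int) - 1) = (s.toList.length : Int) - 0 - 1 - 0 from by ring,
    show (s.toList.length : Int) = (s.toList.length : Int) - 0 from by ring]
  exact h
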